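-- pv_equiv track=rewrite | github.com/megumi-ben/work13-wd | Free/free_pg_baseline/freepg/presuf_shell.py | presuf_shell
-- ===== SOURCE A (Python) =====
-- from typing import Iterable, List
--
-- def presuf_shell(grams: Iterable[str]) -> List[str]:
--     """
--     Compute suffix-free shell by reversing grams and taking prefix-free subset.
--     """
--     reversed_sorted = sorted([g[::-1] for g in grams])
--     kept: List[str] = []
--     prev = None
--     for r in reversed_sorted:
--         if prev is not None and r.startswith(prev):
--             continue
--         kept.append(r[::-1])
--         prev = r
--     return kept
-- ===== SOURCE B (Python) =====
-- from typing import Iterable, List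
--
-- def presuf_shell(grams: Iterable[str]) -> List[str]:
--     """
--     Suffix-free shell: reverse grams, keep a reversed string iff none of its
--     proper prefixes (including '') is also a reversed gram.
--     """
--     S = set(g[::-1] for g in grams)
--     out: List[str] = []
--     for r in sorted(S):
--         if not any(r[:i] in S for i in range(len(r))):
--             out.append(r[::-1])
--     return out
-- ===== Notes on version B (the rewrite author's own statement) =====
-- stated objective: alternative
-- what changed: A sorts all reversed grams (with duplicates) and keeps an element iff it does not start with the previously kept element; B builds a set of the reversed grams once and keeps each distinct sorted element iff none of its proper prefixes r[:i], i in range(len(r)), is in that set, so the keep decision queries the set instead of tracking loop state.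
import Mathlib
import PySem

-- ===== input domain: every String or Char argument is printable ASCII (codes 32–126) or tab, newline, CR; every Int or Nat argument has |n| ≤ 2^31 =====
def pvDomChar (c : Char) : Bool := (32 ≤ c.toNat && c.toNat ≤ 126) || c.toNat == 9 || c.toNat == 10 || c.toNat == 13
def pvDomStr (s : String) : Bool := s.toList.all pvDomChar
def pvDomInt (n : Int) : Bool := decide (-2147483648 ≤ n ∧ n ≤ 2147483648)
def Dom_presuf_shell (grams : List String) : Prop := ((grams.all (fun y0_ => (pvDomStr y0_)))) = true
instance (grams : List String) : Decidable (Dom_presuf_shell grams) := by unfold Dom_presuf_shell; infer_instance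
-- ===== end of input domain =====

-- B replaces A's running-previous adjacency test on the sorted (duplicated) list by a set of the
-- reversed grams queried on every proper prefix of each distinct reversed gram (objective: alternative).

-- ===== PORT A =====
-- g[::-1]
def pvRev (s : String) : String := (PySem.Str.slice? s none none (-1)).getD ""

-- the 'for r in reversed_sorted' loop with its kept/prev state
def presufLoopA : List String → List String → Option String → List String
  | [], kept, _ => kept
  | r :: rest, kept, prev =>
      if (match prev with | some p => PySem.Str.startswith r p | none => false) then
        presufLoopA rest kept prev
      else
        presufLoopA rest (kept ++ [pvRev r]) (some r)

def presuf_shell (grams : List String) : List String :=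
  presufLoopA (PySem.List.sorted (grams.map (fun g => pvRev g)) (fun x => x)) [] none

-- ===== PORT B =====
-- any(r[:i] in S for i in range(len(r)))
def altIsBad (S : PySem.Set String) (r : String) : Bool :=
  (PySem.List.pyRange 0 (PySem.Str.len r)).any
    (fun i => PySem.Set.contains S (PySem.Str.slice r none (some i)))

-- the 'for r in sorted(S)' loop with its out accumulator
def presufLoopB (S : PySem.Set String) : List String → List String → List String
  | [], out => out
  | r :: rest, out =>
      if altIsBad S r then presufLoopB S rest out
      else presufLoopB S rest (out ++ [pvRev r])

def presuf_shell_alt (grams : List String) : List String :=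
  let S : PySem.Set String := PySem.Set.ofList (grams.map (fun g => pvRev g))
  presufLoopB S (PySem.List.sorted S (fun x => x)) []

-- ===== PRECONDITION & SPEC =====
def Spec_presuf_shell (grams : List String) (out : List String) : Prop := out = presuf_shell_alt grams
instance (grams : List String) (out : List String) : Decidable (Spec_presuf_shell grams out) := by unfold Spec_presuf_shell; infer_instance

-- ===== CLAIM (what is proved, stated in full; the proofs are below) =====
def Claim_equal_presuf_shell : Prop := ∀ (grams : List String), Dom_presuf_shell grams → Spec_presuf_shell grams (presuf_shell grams)

-- ===== LEMMAS AND PROOFS =====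

-- r has no proper prefix among the reversed grams xs
def goodP (xs : List String) (r : String) : Prop := ∀ q ∈ xs, q.toList <+: r.toList → q = r

-- adjacent-duplicate removal (proof-side helper)
def dAdj : List String → List String
  | [] => []
  | [a] => [a]
  | a :: b :: l => if a = b then dAdj (b :: l) else a :: dAdj (b :: l)

lemma mem_dAdj (l : List String) (x : String) : x ∈ dAdj l ↔ x ∈ l := by
  induction l with
  | nil => simp [dAdj]
  | cons a t ih =>
    cases t with
    | nil => simp [dAdj]
    | cons b l =>
      by_cases hab : a = b
      · subst hab; simp [dAdj, ih]
      · simp [dAdj, hab, ih]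

lemma dAdj_pairwise (l : List String) (h : l.Pairwise (· ≤ ·)) :
    (dAdj l).Pairwise (· < ·) := by
  induction l with
  | nil => simp [dAdj]
  | cons a t ih =>
    cases t with
    | nil => simp [dAdj]
    | cons b l =>
      rw [List.pairwise_cons] at h
      obtain ⟨hale, hp⟩ := h
      by_cases hab : a = b
      · simpa [dAdj, hab] using ih hp
      · rw [dAdj, if_neg hab, List.pairwise_cons]
        refine ⟨?_, ih hp⟩
        intro x hx
        rw [mem_dAdj] at hx
        have hax : a ≤ x := hale x hx
        rcases lt_or_eq_of_le hax with h | h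
        · exact h
        · exfalso
          subst h
          rcases List.mem_cons.mp hx with h2 | h2
          · exact hab h2
          · have hbx : b ≤ a := (List.pairwise_cons.mp hp).1 a h2
            exact hab (le_antisymm (hale b (by simp)) hbx)

lemma startswith_self (a : String) : PySem.Chars.startswith a.toList a.toList = true :=
  (PySem.Chars.startswith_iff _ _).mpr (List.prefix_refl _)

lemma loopA_cons (r : String) (rest kept : List String) (prev : Option String) :
    presufLoopA (r :: rest) kept prev =
      if (match prev with | some p => PySem.Str.startswith r p | none => false) then
        presufLoopA rest kept prev
      else presufLoopA rest (kept ++ [pvRev r]) (some r) := rfl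

lemma loopA_dup (a : String) (l kept : List String) (prev : Option String) :
    presufLoopA (a :: a :: l) kept prev = presufLoopA (a :: l) kept prev := by
  cases prev with
  | none => simp [presufLoopA, startswith_self]
  | some p =>
    by_cases h : PySem.Chars.startswith a.toList p.toList = true
    · simp [presufLoopA, h]
    · simp [presufLoopA, h, startswith_self]

lemma loopA_dAdj (l : List String) (kept : List String) (prev : Option String) :
    presufLoopA l kept prev = presufLoopA (dAdj l) kept prev := by
  induction l generalizing kept prev with
  | nil => simp [dAdj]
  | cons a t ih =>
    cases t with
    | nil => simp [dAdj]
    | cons b l =>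
      by_cases hab : a = b
      · subst hab
        rw [dAdj, if_pos rfl, loopA_dup, ih]
      · rw [dAdj, if_neg hab, loopA_cons a (b :: l), loopA_cons a (dAdj (b :: l))]
        by_cases hc : (match prev with | some p => PySem.Str.startswith a p | none => false) = true
        · rw [if_pos hc, if_pos hc]; exact ih _ _
        · rw [if_neg hc, if_neg hc]; exact ih _ _

lemma loopB_spec (S : PySem.Set String) (l out : List String) :
    presufLoopB S l out = out ++ (l.filter (fun r => !altIsBad S r)).map pvRev := by
  induction l generalizing out with
  | nil => simp [presufLoopB]
  | cons r t ih =>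
    by_cases h : altIsBad S r = true
    · simp [presufLoopB, h, ih]
    · simp only [Bool.not_eq_true] at h
      simp [presufLoopB, h, ih]

lemma lex_of_prefix_ne {cs ds : List Char} (h : cs <+: ds) (hne : cs ≠ ds) : cs < ds := by
  induction cs generalizing ds with
  | nil =>
    cases ds with
    | nil => exact absurd rfl hne
    | cons d ds => exact List.nil_lt_cons d ds
  | cons c cs ih =>
    obtain ⟨t, rfl⟩ := h
    rw [List.cons_append, List.cons_lt_cons_iff]
    exact Or.inr ⟨rfl, ih ⟨t, rfl⟩ (fun h2 => hne (by rw [List.cons_append, ← h2]))⟩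

lemma prefix_of_between_lt {cs ds es : List Char} (h : cs <+: ds) (h1 : cs < es) (h2 : es < ds) :
    cs <+: es := by
  induction cs generalizing ds es with
  | nil => exact List.nil_prefix
  | cons c cs ih =>
    cases es with
    | nil => exact absurd h1 (by simp)
    | cons e es =>
      cases ds with
      | nil => exact absurd h.length_le (by simp)
      | cons d ds =>
        have hcd : c = d ∧ cs <+: ds := by
          obtain ⟨t, ht⟩ := h
          simp only [List.cons_append, List.cons.injEq] at ht
          exact ⟨ht.1, ⟨t, ht.2⟩⟩
        obtain ⟨rfl, hpre⟩ := hcd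
        rcases List.cons_lt_cons_iff.mp h1 with hlt | ⟨rfl, hlt1⟩
        · rcases List.cons_lt_cons_iff.mp h2 with hlt2 | ⟨heq2, _⟩
          · exact absurd (hlt.trans hlt2) (lt_irrefl _)
          · rw [heq2] at hlt; exact absurd hlt (lt_irrefl _)
        · rcases List.cons_lt_cons_iff.mp h2 with hlt2 | ⟨_, hlt2⟩
          · exact absurd hlt2 (lt_irrefl _)
          · exact List.cons_prefix_cons.mpr ⟨rfl, ih hpre hlt1 hlt2⟩

lemma prefix_of_between {cs ds es : List Char} (h : cs <+: ds) (h1 : cs ≤ es) (h2 : es ≤ ds) :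
    cs <+: es := by
  rcases lt_or_eq_of_le h1 with h1 | rfl
  · rcases lt_or_eq_of_le h2 with h2 | rfl
    · exact prefix_of_between_lt h h1 h2
    · exact h
  · exact List.prefix_refl _

lemma str_lt_of_prefix_ne {q r : String} (h : q.toList <+: r.toList) (hne : q ≠ r) : q < r := by
  rw [String.lt_iff_toList_lt]
  exact lex_of_prefix_ne h (fun he => hne (String.toList_inj.mp he))

lemma slice_toList (r : String) (i : Int) (hi : 0 ≤ i) :
    (PySem.Str.slice r none (some i)).toList = r.toList.take i.toNat := by
  rw [PySem.Str.toList_slice, PySem.Chars.slice_eq_listSlice, PySem.List.slice_to _ hi]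

lemma altIsBad_true_iff (xs : List String) (r : String) :
    (altIsBad (PySem.Set.ofList xs) r = true) ↔ ∃ q ∈ xs, q ≠ r ∧ q.toList <+: r.toList := by
  rw [altIsBad, List.any_eq_true]
  constructor
  · rintro ⟨i, hi, hc⟩
    rw [PySem.List.mem_pyRange_one] at hi
    obtain ⟨hi0, hilt⟩ := hi
    refine ⟨PySem.Str.slice r none (some i), ?_, ?_, ?_⟩
    · rw [← PySem.Set.mem_ofList]; exact (PySem.Set.contains_iff _ _).mp hc
    · intro he
      have hl := congrArg (fun s => s.toList.length) he
      simp only [slice_toList r i hi0, List.length_take] at hl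
      rw [PySem.Str.len_eq] at hilt
      omega
    · rw [slice_toList r i hi0]; exact List.take_prefix _ _
  · rintro ⟨q, hq, hne, hpre⟩
    refine ⟨(q.toList.length : Int), ?_, ?_⟩
    · rw [PySem.List.mem_pyRange_one, PySem.Str.len_eq]
      have hle := hpre.length_le
      have : q.toList.length ≠ r.toList.length := by
        intro he
        exact hne (String.toList_inj.mp (List.IsPrefix.eq_of_length hpre he))
      omega
    · rw [PySem.Set.contains_iff, PySem.Set.mem_ofList]
      have : PySem.Str.slice r none (some (q.toList.length : Int)) = q := by
        rw [← String.toList_inj, slice_toList _ _ (by positivity)]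
        simp only [Int.toNat_natCast]
        exact (List.prefix_iff_eq_take.mp hpre).symm
      rwa [this]

lemma altIsBad_false_iff (xs : List String) (r : String) :
    (altIsBad (PySem.Set.ofList xs) r = false) ↔ goodP xs r := by
  rw [← Bool.not_eq_true, altIsBad_true_iff]
  unfold goodP
  push Not
  constructor
  · intro h q hq hpre
    by_contra hne
    exact (h q hq hne) hpre
  · intro h q hq hne hpre
    exact hne (h q hq hpre)

-- the decisive step: at head r with previous kept p, ¬ goodP forces A's skip test
lemma skip_iff (xs : List String) (p r : String) (t : List String)
    (hgoodp : goodP xs p) (hpr : p < r)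
    (ht : ∀ s ∈ t, r < s)
    (h5 : ∀ q ∈ xs, p < q → q ∈ r :: t ∨ p.toList <+: q.toList)
    (hbad : ¬ goodP xs r) : p.toList <+: r.toList := by
  unfold goodP at hbad
  push Not at hbad
  obtain ⟨q, hq, hpre, hne⟩ := hbad
  have hqr : q < r := str_lt_of_prefix_ne hpre hne
  by_cases hqp : q ≤ p
  · have hqpre : q.toList <+: p.toList :=
      prefix_of_between hpre (String.le_iff_toList_le.mp hqp)
        (String.le_iff_toList_le.mp (le_of_lt hpr))
    have : q = p := hgoodp q hq hqpre
    subst this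
    exact hpre
  · have hpq : p < q := lt_of_not_ge hqp
    rcases h5 q hq hpq with hmem | hppre
    · rcases List.mem_cons.mp hmem with h2 | h2
      · exact absurd h2 hne
      · exact absurd (ht q h2) (lt_asymm hqr)
    · exact hppre.trans hpre

-- main invariant induction over the strictly sorted remaining list
lemma loopA_main (xs : List String) (M : List String) (p : String) (acc : List String)
    (h0 : ∀ r ∈ M, r ∈ xs)
    (h1 : M.Pairwise (· < ·))
    (h2 : ∀ r ∈ M, p < r)
    (h3 : p ∈ xs)
    (h4 : goodP xs p)
    (h5 : ∀ q ∈ xs, p < q → q ∈ M ∨ p.toList <+: q.toList)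
    (h6 : ∀ q ∈ xs, q ∉ M → ∀ s ∈ M, q ≤ s) :
    presufLoopA M acc (some p)
      = acc ++ (M.filter (fun r => !altIsBad (PySem.Set.ofList xs) r)).map pvRev := by
  induction M generalizing p acc with
  | nil => simp [presufLoopA]
  | cons r t ih =>
    have hpr : p < r := h2 r (by simp)
    have hrt : ∀ s ∈ t, r < s := (List.pairwise_cons.mp h1).1
    have hrx : r ∈ xs := h0 r (by simp)
    by_cases hg : goodP xs r
    · -- r is kept
      have hsw : PySem.Chars.startswith r.toList p.toList = false := by
        rw [Bool.eq_false_iff]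
        intro hsw
        have hpre := (PySem.Chars.startswith_iff _ _).mp hsw
        exact absurd (hg p h3 hpre) (ne_of_lt hpr)
      rw [loopA_cons]
      simp only [PySem.Str.startswith_eq, hsw, Bool.false_eq_true, if_false]
      have h5' : ∀ q ∈ xs, r < q → q ∈ t ∨ r.toList <+: q.toList := by
        intro q hq hrq
        by_cases hqt : q ∈ t
        · exact Or.inl hqt
        · exfalso
          have hqM : q ∉ r :: t := by
            simp only [List.mem_cons, not_or]
            exact ⟨fun he => (ne_of_lt hrq) he.symm, hqt⟩
          have := h6 q hq hqM r (by simp)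
          exact absurd hrq (not_lt_of_ge this)
      have h6' : ∀ q ∈ xs, q ∉ t → ∀ s ∈ t, q ≤ s := by
        intro q hq hqt s hs
        by_cases hqr : q = r
        · subst hqr; exact le_of_lt (hrt s hs)
        · exact h6 q hq (by simp only [List.mem_cons, not_or]; exact ⟨hqr, hqt⟩) s (by simp [hs])
      rw [ih r (acc ++ [pvRev r]) (fun s hs => h0 s (by simp [hs])) ((List.pairwise_cons.mp h1).2) hrt hrx hg h5' h6']
      have hfil : (!altIsBad (PySem.Set.ofList xs) r) = true := by
        simp [altIsBad_false_iff xs r, hg]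
      simp [hfil]
    · -- r is skipped
      have hpre : p.toList <+: r.toList := skip_iff xs p r t h4 hpr hrt h5 hg
      have hsw : PySem.Chars.startswith r.toList p.toList = true :=
        (PySem.Chars.startswith_iff _ _).mpr hpre
      rw [loopA_cons]
      simp only [PySem.Str.startswith_eq, hsw, if_true]
      have h5' : ∀ q ∈ xs, p < q → q ∈ t ∨ p.toList <+: q.toList := by
        intro q hq hpq
        rcases h5 q hq hpq with hmem | hppre
        · rcases List.mem_cons.mp hmem with h2' | h2'
          · subst h2'; exact Or.inr hpre
          · exact Or.inl h2'
        · exact Or.inr hppre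
      have h6' : ∀ q ∈ xs, q ∉ t → ∀ s ∈ t, q ≤ s := by
        intro q hq hqt s hs
        by_cases hqr : q = r
        · subst hqr; exact le_of_lt (hrt s hs)
        · exact h6 q hq (by simp only [List.mem_cons, not_or]; exact ⟨hqr, hqt⟩) s (by simp [hs])
      rw [ih p acc (fun s hs => h0 s (by simp [hs])) ((List.pairwise_cons.mp h1).2)
            (fun s hs => h2 s (by simp [hs])) h3 h4 h5' h6']
      have hbt : altIsBad (PySem.Set.ofList xs) r = true := by
        cases hb : altIsBad (PySem.Set.ofList xs) r with
        | false => exact absurd ((altIsBad_false_iff xs r).mp hb) hg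
        | true => rfl
      have hfil : (!altIsBad (PySem.Set.ofList xs) r) = false := by simp [hbt]
      simp [hfil]

-- ===== VERDICT (by name: the statement is the Claim_ definition above) =====
theorem presuf_shell_spec : Claim_equal_presuf_shell := by
  intro grams _
  unfold Spec_presuf_shell presuf_shell presuf_shell_alt
  set xs := grams.map (fun g => pvRev g) with hxs
  set L := PySem.List.sorted xs (fun x => x) with hL
  set M := PySem.List.sorted (PySem.Set.ofList xs) (fun x => x) with hM
  -- M = dAdj L
  have hMd : M = dAdj L := by
    apply PySem.List.sorted_eq_of_perm_of_pairwise_lt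
    · rw [List.perm_ext_iff_of_nodup]
      · intro x
        rw [mem_dAdj, PySem.List.mem_sorted, PySem.Set.mem_ofList]
      · exact ((dAdj_pairwise L (PySem.List.sorted_pairwise xs _)).imp (fun h => ne_of_lt h))
      · exact PySem.Set.nodup_ofList xs
    · exact dAdj_pairwise L (PySem.List.sorted_pairwise xs _)
  rw [loopA_dAdj, ← hMd, loopB_spec]
  -- process the head of M
  have hMprop : ∀ x, x ∈ M ↔ x ∈ xs := by
    intro x; rw [hM, PySem.List.mem_sorted, PySem.Set.mem_ofList]
  have hMlt : M.Pairwise (· < ·) := PySem.List.sorted_ofList_pairwise_lt xs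
  cases hMc : M with
  | nil => rw [← hM, hMc]; simp [presufLoopA]
  | cons r t =>
    rw [← hM, hMc]
    have hrx : r ∈ xs := (hMprop r).mp (by rw [hMc]; simp)
    have hrt : ∀ s ∈ t, r < s := by
      rw [hMc] at hMlt; exact (List.pairwise_cons.mp hMlt).1
    have hg : goodP xs r := by
      intro q hq hpre
      by_contra hne
      have hqr : q < r := str_lt_of_prefix_ne hpre hne
      have hqM : q ∈ M := (hMprop q).mpr hq
      rw [hMc] at hqM
      rcases List.mem_cons.mp hqM with h2 | h2
      · exact hne h2
      · exact absurd (hrt q h2) (lt_asymm hqr)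
    rw [loopA_cons]
    simp only [Bool.false_eq_true, if_false, List.nil_append]
    rw [loopA_main xs t r [pvRev r]
          (fun s hs => (hMprop s).mp (by rw [hMc]; simp [hs]))
          (by rw [hMc] at hMlt; exact (List.pairwise_cons.mp hMlt).2)
          hrt hrx hg
          (fun q hq hrq => Or.inl (by
            have hqM : q ∈ M := (hMprop q).mpr hq
            rw [hMc] at hqM
            rcases List.mem_cons.mp hqM with h2 | h2
            · exact absurd h2 (ne_of_lt hrq).symm
            · exact h2))
          (fun q hq hqt s hs => by
            have hqM : q ∈ M := (hMprop q).mpr hq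
            rw [hMc] at hqM
            rcases List.mem_cons.mp hqM with h2 | h2
            · subst h2; exact le_of_lt (hrt s hs)
            · exact absurd h2 hqt)]
    have hfil : (!altIsBad (PySem.Set.ofList xs) r) = true := by
      simp [altIsBad_false_iff xs r, hg]
    simp [hfil]
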